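-- pv_equiv track=rewrite | github.com/sundeep2087/algorithms-python | backtracking/sum_string.py | is_sum_string
-- ===== SOURCE A (Python) =====
-- def calc_sum(str1, str2):
--     if len(str1) > len(str2):
--         str1, str2 = str2, str1
--
--     n1 = len(str1)
--     n2 = len(str2)
--     str1 = str1[::-1]
--     str2 = str2[::-1]
--
--     carry = 0
--     res_sum = ""
--
--     for i in range(n1):
--         sum = (ord(str1[i]) - 48) + (ord(str2[i]) - 48) + carry
--         res_sum += chr(sum % 10 + 48)
--         carry = sum // 10
--
--     for i in range(n1, n2):
--         sum = (ord(str2[i]) - 48) + carry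
--         res_sum += chr(sum % 10 + 48)
--         carry = sum // 10
--
--     if carry:
--         res_sum += chr(carry + 48)
--
--     res_sum = res_sum [::-1]
--     return res_sum
--
-- def check_sum_string_util(digit_string, beg, len1, len2):
--     str1 = digit_string[beg: beg+len1]
--     str2 = digit_string[beg+len1: beg+len1+len2]
--     str3 = calc_sum(str1, str2)
--
--     str3_len = len(str3)
--     if str3_len > (len(digit_string) - (beg+len1+len2)):
--         return False
--
--     if str3 == digit_string[beg+len1+len2: beg+len1+len2+str3_len]:
--         if len(digit_string) == (beg+len1+len2+str3_len):
--             return True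
--         return check_sum_string_util(digit_string, beg+len1, len2, str3_len)
--     return False
--
-- def is_sum_string(digit_string):
--     n = len(digit_string)
--     if n >= 3:
--         for i in range(1, n):
--             for j in range(1, n-i):
--                 if check_sum_string_util(digit_string, 0, i, j):
--                     return True
--     return False
-- ===== SOURCE B (Python) =====
-- # Different decomposition: digit addition as a single backward two-pointer walk
-- # (no swap, no string reversal, one loop), and the sum-chain verifier as an
-- # iterative while loop with startswith instead of recursion.
--
-- def _add(s1, s2):
--     # walk both strings from their last character (least significant digit first)
--     i, j = len(s1) - 1, len(s2) - 1
--     carry = 0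
--     out = []
--     while i >= 0 or j >= 0:
--         x = ord(s1[i]) - 48 if i >= 0 else 0
--         y = ord(s2[j]) - 48 if j >= 0 else 0
--         t = x + y + carry
--         out.append(chr(t % 10 + 48))
--         carry = t // 10
--         i -= 1
--         j -= 1
--     if carry:
--         out.append(chr(carry + 48))
--     return ''.join(reversed(out))
--
-- def _verify(s, beg, len1, len2):
--     n = len(s)
--     while True:
--         end = beg + len1 + len2
--         str3 = _add(s[beg:beg + len1], s[beg + len1:end])
--         if end > n or not s.startswith(str3, end):
--             return False
--         if end + len(str3) == n:
--             return True
--         beg, len1, len2 = beg + len1, len2, len(str3)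
--
-- def is_sum_string(digit_string):
--     n = len(digit_string)
--     for i in range(1, n):
--         for j in range(1, n - i):
--             if _verify(digit_string, 0, i, j):
--                 return True
--     return False
-- ===== Notes on version B (the rewrite author's own statement) =====
-- stated objective: alternative
-- what changed: Digit-string addition is rewritten as a single structural recursion over both (reversed) character lists instead of a swap plus two index loops, and the recursive sum-chain verifier becomes an iterative while loop that checks the next block with startswith.
import Mathlib
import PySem

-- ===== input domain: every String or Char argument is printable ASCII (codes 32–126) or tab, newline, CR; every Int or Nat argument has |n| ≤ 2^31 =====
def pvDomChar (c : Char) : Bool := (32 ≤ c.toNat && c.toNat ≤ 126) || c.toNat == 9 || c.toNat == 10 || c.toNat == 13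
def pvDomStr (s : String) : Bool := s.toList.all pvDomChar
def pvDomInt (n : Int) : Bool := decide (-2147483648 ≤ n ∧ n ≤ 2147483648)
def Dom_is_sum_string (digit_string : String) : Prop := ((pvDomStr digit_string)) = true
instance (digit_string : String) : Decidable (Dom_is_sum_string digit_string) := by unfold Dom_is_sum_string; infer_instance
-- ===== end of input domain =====

-- B replaces A's swap + two index loops for digit addition by one structural recursion
-- over both reversed character lists, and A's recursive chain verifier by an iterative
-- while loop (ported as fuel recursion); objective: alternative decomposition, same cost.

-- ===== PORT A =====
-- body of A's first for-loop (the lambda of the fold, named for reuse in lemmas)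
def pvStep1 (st : Int × List Char) (x y : Char) : Int × List Char :=
  let sum := ((x.toNat : Int) - 48) + ((y.toNat : Int) - 48) + st.1
  (PySem.Int.floordiv sum 10, st.2 ++ [Char.ofNat (PySem.Int.mod sum 10 + 48).toNat])

-- body of A's second for-loop
def pvStep2 (st : Int × List Char) (y : Char) : Int × List Char :=
  let sum := ((y.toNat : Int) - 48) + st.1
  (PySem.Int.floordiv sum 10, st.2 ++ [Char.ofNat (PySem.Int.mod sum 10 + 48).toNat])

-- calc_sum: swap so str1 is the shorter, reverse both, digit loop over range(n1),
-- tail loop over range(n1, n2), final carry, reverse.  str[i] is ported as getD i ' '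
-- (exact: every index produced by the ranges is in bounds); chr(k) as Char.ofNat k.toNat
-- (exact: the arguments are provably nonnegative valid code points here).
def pvCalcSum (str1 str2 : List Char) : List Char :=
  let p := if str2.length < str1.length then (str2, str1) else (str1, str2)
  let n1 := p.1.length
  let n2 := p.2.length
  let s1 := p.1.reverse
  let s2 := p.2.reverse
  let st := (List.range n1).foldl (fun st i => pvStep1 st (s1.getD i ' ') (s2.getD i ' ')) (0, [])
  let st2 := (List.range' n1 (n2 - n1)).foldl (fun st i => pvStep2 st (s2.getD i ' ')) st
  let res := if st2.1 ≠ 0 then st2.2 ++ [Char.ofNat (st2.1 + 48).toNat] else st2.2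
  res.reverse

-- check_sum_string_util; the fuel only makes the recursion total in Lean (n+1 is more
-- than the depth any call from is_sum_string can reach, since beg strictly increases
-- and recursion requires beg < len).  Slices s[a:b] (0 ≤ a ≤ b) are (drop a).take (b-a), exact.
def pvUtil (s : List Char) : Nat → Nat → Nat → Nat → Bool
  | 0, _, _, _ => false
  | fuel+1, beg, len1, len2 =>
    let str1 := (s.drop beg).take len1
    let str2 := (s.drop (beg+len1)).take len2
    let str3 := pvCalcSum str1 str2
    let l3 := str3.length
    if (l3 : Int) > (s.length : Int) - ((beg+len1+len2 : Nat) : Int) then false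
    else if str3 = (s.drop (beg+len1+len2)).take l3 then
      if s.length = beg+len1+len2+l3 then true
      else pvUtil s fuel (beg+len1) len2 l3
    else false

def is_sum_string (digit_string : String) : Bool :=
  let s := digit_string.toList
  let n := s.length
  if 3 ≤ n then
    (List.range' 1 (n-1)).any fun i =>
      (List.range' 1 (n - i - 1)).any fun j =>
        pvUtil s (n+1) 0 i j
  else false

-- ===== PORT B =====
-- _add's while loop walks s1, s2 from their last character; it is ported as structural
-- recursion on the two reversed character lists (one call per loop iteration; the four
-- branches are the i >= 0 / j >= 0 pointer tests, an absent character contributing 0,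
-- and the final-carry append is the both-exhausted base case).
def pvGo : List Char → List Char → Int → List Char
  | [], [], c => if c ≠ 0 then [Char.ofNat (c + 48).toNat] else []
  | x :: xs, [], c =>
      let t := ((x.toNat : Int) - 48) + c
      Char.ofNat (PySem.Int.mod t 10 + 48).toNat :: pvGo xs [] (PySem.Int.floordiv t 10)
  | [], y :: ys, c =>
      let t := ((y.toNat : Int) - 48) + c
      Char.ofNat (PySem.Int.mod t 10 + 48).toNat :: pvGo [] ys (PySem.Int.floordiv t 10)
  | x :: xs, y :: ys, c =>
      let t := ((x.toNat : Int) - 48) + ((y.toNat : Int) - 48) + c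
      Char.ofNat (PySem.Int.mod t 10 + 48).toNat :: pvGo xs ys (PySem.Int.floordiv t 10)
termination_by a b _ => a.length + b.length

-- _add (reversing the inputs realises the backward walk; the final reverse is ''.join(reversed(out)))
def pvAdd (s1 s2 : List Char) : List Char := (pvGo s1.reverse s2.reverse 0).reverse

-- _verify: the while loop as fuel recursion (fuel = totality device only, cf. pvUtil).
-- s.startswith(str3, e) is ported as e ≤ len s ∧ isPrefixOf (exact: Python's startswith
-- with a start index beyond the length is False, otherwise it tests the prefix of the suffix).
def pvVerify (s : List Char) : Nat → Nat → Nat → Nat → Bool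
  | 0, _, _, _ => false
  | fuel+1, beg, len1, len2 =>
    let e := beg + len1 + len2
    let str3 := pvAdd ((s.drop beg).take len1) ((s.drop (beg+len1)).take len2)
    if e ≤ s.length ∧ str3.isPrefixOf (s.drop e) then
      if e + str3.length = s.length then true
      else pvVerify s fuel (beg+len1) len2 str3.length
    else false

def is_sum_string_alt (digit_string : String) : Bool :=
  let s := digit_string.toList
  let n := s.length
  (List.range' 1 (n-1)).any fun i =>
    (List.range' 1 (n - i - 1)).any fun j =>
      pvVerify s (n+1) 0 i j

-- ===== PRECONDITION & SPEC =====
def Spec_is_sum_string (digit_string : String) (out : Bool) : Prop := out = is_sum_string_alt digit_string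
instance (digit_string : String) (out : Bool) : Decidable (Spec_is_sum_string digit_string out) := by unfold Spec_is_sum_string; infer_instance

-- ===== CLAIM (what is proved, stated in full; the proofs are below) =====
def Claim_equal_is_sum_string : Prop := ∀ (digit_string : String), Dom_is_sum_string digit_string → Spec_is_sum_string digit_string (is_sum_string digit_string)

-- ===== LEMMAS AND PROOFS =====

theorem pvGo_nil_comm : ∀ (b : List Char) (c : Int), pvGo [] b c = pvGo b [] c := by
  intro b
  induction b with
  | nil => intro c; rfl
  | cons y ys ih => intro c; simp only [pvGo]; rw [ih]

-- pvGo is symmetric in its two digit lists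
theorem pvGo_comm : ∀ (a b : List Char) (c : Int), pvGo a b c = pvGo b a c := by
  intro a
  induction a with
  | nil => intro b c; exact pvGo_nil_comm b c
  | cons x xs ih =>
      intro b c
      cases b with
      | nil => exact (pvGo_nil_comm (x :: xs) c).symm
      | cons y ys =>
          simp only [pvGo]
          rw [show ((x.toNat : Int) - 48) + ((y.toNat : Int) - 48) + c
                = ((y.toNat : Int) - 48) + ((x.toNat : Int) - 48) + c from by ring]
          rw [ih ys]

-- a fold over range w.length reading w.getD is a fold over w
theorem foldl_range_getD {σ : Type} (g : σ → Char → σ) :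
    ∀ (w : List Char) (s : σ),
      (List.range w.length).foldl (fun st i => g st (w.getD i ' ')) s = w.foldl g s := by
  intro w
  induction w with
  | nil => intro s; rfl
  | cons x xs ih =>
      intro s
      rw [List.length_cons, List.range_succ_eq_map, List.foldl_cons, List.foldl_map]
      simp only [List.getD_cons_succ, List.getD_cons_zero]
      exact ih (g s x)

-- the binary version, over the zip of a shorter and a longer list
theorem foldl_range_getD2 {σ : Type} (g : σ → Char → Char → σ) :
    ∀ (u v : List Char) (s : σ), u.length ≤ v.length →
      (List.range u.length).foldl (fun st i => g st (u.getD i ' ') (v.getD i ' ')) s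
        = (u.zip v).foldl (fun st p => g st p.1 p.2) s := by
  intro u
  induction u with
  | nil => intro v s _; rfl
  | cons x xs ih =>
      intro v s h
      cases v with
      | nil => simp at h
      | cons y ys =>
          rw [List.length_cons, List.range_succ_eq_map, List.foldl_cons, List.foldl_map]
          simp only [List.getD_cons_succ, List.getD_cons_zero, List.zip_cons_cons, List.foldl_cons]
          exact ih ys (g s x y) (by simpa using h)

-- A's second loop + final-carry step equals pvGo with an empty first list
theorem go_nil : ∀ (v : List Char) (c : Int) (res : List Char),
    (if (v.foldl pvStep2 (c, res)).1 ≠ 0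
       then (v.foldl pvStep2 (c, res)).2 ++ [Char.ofNat ((v.foldl pvStep2 (c, res)).1 + 48).toNat]
       else (v.foldl pvStep2 (c, res)).2)
      = res ++ pvGo [] v c := by
  intro v
  induction v with
  | nil =>
      intro c res
      simp only [List.foldl_nil, pvGo]
      split <;> simp_all
  | cons y ys ih =>
      intro c res
      simp only [List.foldl_cons, pvGo]
      rw [show pvStep2 (c, res) y
            = (PySem.Int.floordiv (((y.toNat : Int) - 48) + c) 10,
               res ++ [Char.ofNat (PySem.Int.mod (((y.toNat : Int) - 48) + c) 10 + 48).toNat])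
          from rfl]
      rw [ih]
      simp

-- A's whole loop body (both loops + carry) equals pvGo, for shorter u
theorem go_zip : ∀ (u v : List Char) (c : Int) (res : List Char), u.length ≤ v.length →
    (if ((v.drop u.length).foldl pvStep2 ((u.zip v).foldl (fun st p => pvStep1 st p.1 p.2) (c, res))).1 ≠ 0
       then ((v.drop u.length).foldl pvStep2 ((u.zip v).foldl (fun st p => pvStep1 st p.1 p.2) (c, res))).2
              ++ [Char.ofNat (((v.drop u.length).foldl pvStep2 ((u.zip v).foldl (fun st p => pvStep1 st p.1 p.2) (c, res))).1 + 48).toNat]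
       else ((v.drop u.length).foldl pvStep2 ((u.zip v).foldl (fun st p => pvStep1 st p.1 p.2) (c, res))).2)
      = res ++ pvGo u v c := by
  intro u
  induction u with
  | nil =>
      intro v c res _
      simpa using go_nil v c res
  | cons x xs ih =>
      intro v c res h
      cases v with
      | nil => simp at h
      | cons y ys =>
          simp only [List.zip_cons_cons, List.foldl_cons, List.length_cons, List.drop_succ_cons,
            pvGo]
          rw [show pvStep1 (c, res) x y
                = (PySem.Int.floordiv (((x.toNat : Int) - 48) + ((y.toNat : Int) - 48) + c) 10,
                   res ++ [Char.ofNat (PySem.Int.mod (((x.toNat : Int) - 48) + ((y.toNat : Int) - 48) + c) 10 + 48).toNat])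
              from rfl]
          rw [ih ys _ _ (by simpa using h)]
          simp

-- the two digit-addition routines agree
theorem calc_eq : ∀ (s1 s2 : List Char), pvCalcSum s1 s2 = pvAdd s1 s2 := by
  intro s1 s2
  unfold pvCalcSum pvAdd
  by_cases h : s2.length < s1.length
  · simp only [if_pos h]
    rw [show s2.length = s2.reverse.length from (List.length_reverse).symm]
    rw [foldl_range_getD2 pvStep1 s2.reverse s1.reverse _ (by simp; omega)]
    rw [show s1.length = s1.reverse.length from (List.length_reverse).symm]
    rw [List.range'_eq_map_range, List.foldl_map]
    have hgetD : ∀ (i : Nat),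
        s1.reverse.getD (s2.reverse.length + i) ' ' = (s1.reverse.drop s2.reverse.length).getD i ' ' := by
      intro i
      simp [List.getD_eq_getElem?_getD, List.getElem?_drop]
    simp only [hgetD]
    rw [show s1.reverse.length - s2.reverse.length = (s1.reverse.drop s2.reverse.length).length from
      (List.length_drop).symm]
    rw [foldl_range_getD pvStep2]
    rw [go_zip s2.reverse s1.reverse 0 [] (by simp; omega)]
    rw [pvGo_comm]
    simp
  · simp only [if_neg h]
    rw [show s1.length = s1.reverse.length from (List.length_reverse).symm]
    rw [foldl_range_getD2 pvStep1 s1.reverse s2.reverse _ (by simp; omega)]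
    rw [show s2.length = s2.reverse.length from (List.length_reverse).symm]
    rw [List.range'_eq_map_range, List.foldl_map]
    have hgetD : ∀ (i : Nat),
        s2.reverse.getD (s1.reverse.length + i) ' ' = (s2.reverse.drop s1.reverse.length).getD i ' ' := by
      intro i
      simp [List.getD_eq_getElem?_getD, List.getElem?_drop]
    simp only [hgetD]
    rw [show s2.reverse.length - s1.reverse.length = (s2.reverse.drop s1.reverse.length).length from
      (List.length_drop).symm]
    rw [foldl_range_getD pvStep2]
    rw [go_zip s1.reverse s2.reverse 0 [] (by simp; omega)]
    simp

-- A's guard chain and B's startswith-style guard produce the same result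
theorem ifs_eq (n e : Nat) (str3 tail : List Char) (htail : tail.length = n - e)
    (recA recB : Bool) (hrec : recA = recB) :
    (if (str3.length : Int) > (n : Int) - ((e : Nat) : Int) then false
     else if str3 = tail.take str3.length then (if n = e + str3.length then true else recA) else false)
    = (if e ≤ n ∧ str3.isPrefixOf tail then (if e + str3.length = n then true else recB) else false) := by
  by_cases hpre : str3 = tail.take str3.length
  · have hpref : str3.isPrefixOf tail = true := by
      rw [List.isPrefixOf_iff_prefix, hpre]
      exact List.take_prefix _ _
    have hlen : str3.length ≤ tail.length := by
      have h0 := (List.take_prefix str3.length tail).length_le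
      rw [← hpre] at h0
      exact h0
    by_cases hle : e ≤ n
    · have h1 : ¬ ((str3.length : Int) > (n : Int) - ((e : Nat) : Int)) := by omega
      rw [if_neg h1, if_pos hpre, if_pos (show e ≤ n ∧ str3.isPrefixOf tail from ⟨hle, hpref⟩)]
      by_cases hend : e + str3.length = n
      · rw [if_pos hend, if_pos (show n = e + str3.length from hend.symm)]
      · rw [if_neg hend, if_neg (show ¬ n = e + str3.length from fun hc => hend hc.symm), hrec]
    · have h1 : (str3.length : Int) > (n : Int) - ((e : Nat) : Int) := by
        have h2 : str3.length = 0 := by omega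
        rw [h2]; omega
      rw [if_pos h1, if_neg (show ¬ (e ≤ n ∧ str3.isPrefixOf tail) from fun hc => hle hc.1)]
  · have hpref : ¬ (str3.isPrefixOf tail = true) := by
      rw [List.isPrefixOf_iff_prefix, List.prefix_iff_eq_take]
      exact hpre
    rw [if_neg (show ¬ (e ≤ n ∧ str3.isPrefixOf tail) from fun hc => hpref hc.2)]
    split <;> rfl

-- the recursive verifier and the loop verifier agree (same fuel)
theorem util_eq : ∀ (fuel : Nat) (s : List Char) (beg len1 len2 : Nat),
    pvUtil s fuel beg len1 len2 = pvVerify s fuel beg len1 len2 := by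
  intro fuel
  induction fuel with
  | zero => intro s beg len1 len2; rfl
  | succ fuel ih =>
      intro s beg len1 len2
      simp only [pvUtil, pvVerify, calc_eq]
      exact ifs_eq s.length (beg + len1 + len2) _ _ (by simp) _ _
        (ih s (beg + len1) len2 _)

-- for n < 3 the unguarded double loop of B finds nothing
theorem alt_small (s : List Char) (h : s.length < 3) :
    ((List.range' 1 (s.length - 1)).any fun i =>
      (List.range' 1 (s.length - i - 1)).any fun j =>
        pvVerify s (s.length + 1) 0 i j) = false := by
  rcases s with _ | ⟨a, _ | ⟨b, _ | ⟨c, t⟩⟩⟩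
  · rfl
  · rfl
  · rfl
  · simp at h
    omega

-- ===== VERDICT (by name: the statement is the Claim_ definition above) =====
theorem is_sum_string_spec : Claim_equal_is_sum_string := by
  unfold Claim_equal_is_sum_string
  intro ds _
  unfold Spec_is_sum_string is_sum_string is_sum_string_alt
  by_cases h : 3 ≤ ds.toList.length
  · simp only [if_pos h, util_eq]
  · rw [if_neg h, alt_small ds.toList (by omega)]
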